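-- pv_equiv track=rewrite | github.com/SmileBobi/ai_firefighting | nlp_base/fire_scraper/fire_text_analyzer.py | generate_document_summary
-- ===== SOURCE A (Python) =====
-- def generate_document_summary(text: str, max_length: int = 200) -> str:
--     """生成文档摘要"""
--     if not text:
--         return ""
--
--     # 简单的摘要生成（取前几段）
--     paragraphs = [p.strip() for p in text.split('\n\n') if p.strip()]
--
--     summary = ""
--     for paragraph in paragraphs:
--         if len(summary) + len(paragraph) <= max_length:
--             summary += paragraph + "\n"
--         else:
--             break
--
--     return summary.strip()
-- ===== SOURCE B (Python) =====
-- def generate_document_summary(text: str, max_length: int = 200) -> str: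
--     if not text:
--         return ""
--     paragraphs = [p.strip() for p in text.split('\n\n') if p.strip()]
--     cum = []
--     total = 0
--     for p in paragraphs:
--         total += len(p) + 1
--         cum.append(total)
--     return "\n".join(p for p, c in zip(paragraphs, cum) if c <= max_length + 1)
-- ===== Notes on version B (the rewrite author's own statement) =====
-- stated objective: alternative
-- what changed: Replaces A's running-string accumulator with an early break (and a final strip) by a table-first pass: build the cumulative lengths of the stripped paragraphs, select the paragraphs whose cumulative length stays within max_length+1, and join them once with a newline separator.
import Mathlib
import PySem

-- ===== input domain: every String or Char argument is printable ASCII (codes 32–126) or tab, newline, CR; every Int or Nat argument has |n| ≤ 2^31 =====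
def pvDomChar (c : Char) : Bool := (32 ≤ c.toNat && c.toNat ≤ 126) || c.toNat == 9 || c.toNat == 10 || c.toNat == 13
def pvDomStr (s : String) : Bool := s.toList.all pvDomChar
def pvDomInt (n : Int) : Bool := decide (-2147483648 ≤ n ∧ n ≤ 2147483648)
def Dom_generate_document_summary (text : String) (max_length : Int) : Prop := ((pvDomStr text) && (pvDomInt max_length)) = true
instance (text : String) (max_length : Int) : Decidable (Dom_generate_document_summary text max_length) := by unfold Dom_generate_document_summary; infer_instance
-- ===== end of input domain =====

-- B replaces A's running-string accumulator with early break by a cumulative-length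
-- table and a threshold filter joined once at the end (alternative decomposition, same cost).

-- ===== PORT A =====
-- the 'for paragraph in paragraphs: if len(summary)+len(paragraph) <= max_length: summary += paragraph+"\n" else: break' loop
def pvSummaryLoopA (max_length : Int) : List String → String → String
  | [], summary => summary
  | p :: rest, summary =>
    if PySem.Str.len summary + PySem.Str.len p ≤ max_length then
      pvSummaryLoopA max_length rest (summary ++ (p ++ "\n"))
    else
      summary

def generate_document_summary (text : String) (max_length : Int) : String :=
  if text = "" then ""
  else
    -- text.split('\n\n') : the separator is non-empty, so split? is always some
    let paragraphs := (((PySem.Str.split? text "\n\n").getD []).map PySem.Str.strip).filter (fun p => p ≠ "")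
    PySem.Str.strip (pvSummaryLoopA max_length paragraphs "")

-- ===== PORT B =====
-- the 'total += len(p) + 1; cum.append(total)' loop
def pvCumLoopB : List String → Int → List Int
  | [], _ => []
  | p :: rest, total =>
    (total + PySem.Str.len p + 1) :: pvCumLoopB rest (total + PySem.Str.len p + 1)

def generate_document_summary_alt (text : String) (max_length : Int) : String :=
  if text = "" then ""
  else
    let paragraphs := (((PySem.Str.split? text "\n\n").getD []).map PySem.Str.strip).filter (fun p => p ≠ "")
    let cum := pvCumLoopB paragraphs 0
    PySem.Str.join "\n"
      (((paragraphs.zip cum).filter (fun pc => decide (pc.2 ≤ max_length + 1))).map Prod.fst)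

-- ===== PRECONDITION & SPEC =====
def Spec_generate_document_summary (text : String) (max_length : Int) (out : String) : Prop := out = generate_document_summary_alt text max_length
instance (text : String) (max_length : Int) (out : String) : Decidable (Spec_generate_document_summary text max_length out) := by unfold Spec_generate_document_summary; infer_instance

-- ===== CLAIM (what is proved, stated in full; the proofs are below) =====
def Claim_equal_generate_document_summary : Prop := ∀ (text : String) (max_length : Int), Dom_generate_document_summary text max_length → Spec_generate_document_summary text max_length (generate_document_summary text max_length)

-- ===== LEMMAS AND PROOFS =====

-- the prefix of ps that A's loop accepts, starting from accumulated length t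
def pvSel (M : Int) : Int → List String → List String
  | _, [] => []
  | t, p :: rest =>
    if t + PySem.Str.len p ≤ M then p :: pvSel M (t + PySem.Str.len p + 1) rest else []

-- p1 ++ "\n" ++ p2 ++ "\n" ++ … : the raw string A's loop accumulates
def pvJoinNL : List String → String
  | [] => ""
  | p :: rest => p ++ ("\n" ++ pvJoinNL rest)

lemma pvNL : ("\n" : String).toList = ['\n'] := by decide

lemma pvDWhead {q : Char → Bool} {c : Char} {t : List Char} : ∀ {l : List Char},
    List.dropWhile q l = c :: t → q c = false := by
  intro l
  induction l with
  | nil => intro h; simp at h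
  | cons a l ih =>
    intro h
    rw [List.dropWhile_cons] at h
    split_ifs at h with ha
    · exact ih h
    · injection h with h1 _
      subst h1
      simpa using ha

lemma pvDWidem (q : Char → Bool) (l : List Char) :
    List.dropWhile q (List.dropWhile q l) = List.dropWhile q l := by
  cases hd : List.dropWhile q l with
  | nil => rfl
  | cons c t =>
    have hc := pvDWhead hd
    rw [List.dropWhile_cons, hc]
    simp

lemma pvDW_append {q : Char → Bool} {a : List Char} (b : List Char)
    (ha : List.dropWhile q a = a) (hane : a ≠ []) :
    List.dropWhile q (a ++ b) = a ++ b := by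
  cases a with
  | nil => exact absurd rfl hane
  | cons c t =>
    have hc := pvDWhead ha
    rw [List.cons_append, List.dropWhile_cons, hc]
    simp

-- a stripped string has no leading or trailing whitespace
lemma pvStripStripped (cs : List Char) :
    List.dropWhile PySem.Chars.isspace (PySem.Chars.strip cs) = PySem.Chars.strip cs ∧
    List.dropWhile PySem.Chars.isspace (PySem.Chars.strip cs).reverse = (PySem.Chars.strip cs).reverse := by
  unfold PySem.Chars.strip PySem.Chars.lstrip PySem.Chars.rstrip
  constructor
  · set L := List.dropWhile PySem.Chars.isspace cs with hL
    set R := List.dropWhile PySem.Chars.isspace L.reverse with hR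
    cases hRr : R.reverse with
    | nil => simp
    | cons c t =>
      have hpre : R.reverse <+: L := by
        have hsuf : R <:+ L.reverse := hR ▸ List.dropWhile_suffix _
        exact (List.reverse_suffix (l₁ := R.reverse) (l₂ := L)).mp (by simpa using hsuf)
      have hLne : L ≠ [] := by
        intro h0
        rw [hR, h0] at hRr
        simp at hRr
      obtain ⟨d, u, hdu⟩ := List.exists_cons_of_ne_nil hLne
      have hd : PySem.Chars.isspace d = false := pvDWhead (hL.symm.trans hdu)
      rw [hRr, hdu] at hpre
      obtain ⟨rfl, -⟩ := List.cons_prefix_cons.mp hpre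
      rw [List.dropWhile_cons, hd]
      simp
  · rw [List.reverse_reverse]
    exact pvDWidem _ _

-- '\n'.join of non-empty whitespace-free strings is non-empty and whitespace-free at both ends
lemma pvJoinProps : ∀ (rest : List String) (p : String),
    (∀ r ∈ p :: rest, List.dropWhile PySem.Chars.isspace r.toList = r.toList ∧
      List.dropWhile PySem.Chars.isspace r.toList.reverse = r.toList.reverse ∧ r ≠ "") →
    PySem.Chars.join ['\n'] ((p :: rest).map String.toList) ≠ [] ∧
    List.dropWhile PySem.Chars.isspace (PySem.Chars.join ['\n'] ((p :: rest).map String.toList)) =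
      PySem.Chars.join ['\n'] ((p :: rest).map String.toList) ∧
    List.dropWhile PySem.Chars.isspace (PySem.Chars.join ['\n'] ((p :: rest).map String.toList)).reverse =
      (PySem.Chars.join ['\n'] ((p :: rest).map String.toList)).reverse := by
  intro rest
  induction rest with
  | nil =>
    intro p H
    obtain ⟨h1, h2, h3⟩ := H p (by simp)
    have hpne : p.toList ≠ [] := fun hh => h3 (String.toList_eq_nil_iff.mp hh)
    simp only [List.map_cons, List.map_nil, PySem.Chars.join_singleton]
    exact ⟨hpne, h1, h2⟩
  | cons q t ih =>
    intro p H
    obtain ⟨h1, h2, h3⟩ := H p (by simp)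
    have hpne : p.toList ≠ [] := fun hh => h3 (String.toList_eq_nil_iff.mp hh)
    obtain ⟨ihne, ih1, ih2⟩ := ih q (fun r hr => H r (by simp at hr ⊢; tauto))
    simp only [List.map_cons] at ihne ih1 ih2 ⊢
    rw [PySem.Chars.join_cons_cons]
    refine ⟨by simp [hpne], ?_, ?_⟩
    · rw [List.append_assoc]
      exact pvDW_append _ h1 hpne
    · simp only [List.reverse_append, List.reverse_cons, List.singleton_append,
        List.append_assoc]
      exact pvDW_append _ ih2 (by simpa using ihne)

lemma pvStripAppendNL (J : List Char) (hne : J ≠ [])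
    (h1 : List.dropWhile PySem.Chars.isspace J = J)
    (h2 : List.dropWhile PySem.Chars.isspace J.reverse = J.reverse) :
    PySem.Chars.strip (J ++ ['\n']) = J := by
  unfold PySem.Chars.strip PySem.Chars.lstrip PySem.Chars.rstrip
  rw [pvDW_append _ h1 hne]
  rw [List.reverse_append]
  have hsp : PySem.Chars.isspace '\n' = true := by decide
  simp only [List.reverse_cons, List.reverse_nil, List.nil_append, List.singleton_append,
    List.dropWhile_cons, hsp, if_true, h2, List.reverse_reverse]

lemma pvJoinNL_toList : ∀ (rest : List String) (p : String),
    (pvJoinNL (p :: rest)).toList = PySem.Chars.join ['\n'] ((p :: rest).map String.toList) ++ ['\n'] := by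
  intro rest
  induction rest with
  | nil =>
    intro p
    simp [pvJoinNL, String.toList_append, pvNL, PySem.Chars.join_singleton]
  | cons q t ih =>
    intro p
    show (p ++ ("\n" ++ pvJoinNL (q :: t))).toList = _
    rw [String.toList_append, String.toList_append, ih q]
    simp [pvNL, List.map_cons, PySem.Chars.join_cons_cons, List.append_assoc]

lemma pvStripJoin (ps : List String)
    (H : ∀ r ∈ ps, List.dropWhile PySem.Chars.isspace r.toList = r.toList ∧
      List.dropWhile PySem.Chars.isspace r.toList.reverse = r.toList.reverse ∧ r ≠ "") :
    PySem.Str.strip (pvJoinNL ps) = PySem.Str.join "\n" ps := by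
  rw [← String.toList_inj, PySem.Str.toList_strip, PySem.Str.toList_join, pvNL]
  cases ps with
  | nil =>
    simp [pvJoinNL, PySem.Chars.join_nil, PySem.Chars.strip, PySem.Chars.lstrip, PySem.Chars.rstrip]
  | cons p rest =>
    rw [pvJoinNL_toList]
    obtain ⟨hne, h1, h2⟩ := pvJoinProps rest p H
    exact pvStripAppendNL _ hne h1 h2

lemma pvLoopEq (M : Int) : ∀ (ps : List String) (s : String),
    pvSummaryLoopA M ps s = s ++ pvJoinNL (pvSel M (PySem.Str.len s) ps) := by
  intro ps
  induction ps with
  | nil => intro s; simp [pvSummaryLoopA, pvSel, pvJoinNL]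
  | cons p rest ih =>
    intro s
    simp only [pvSummaryLoopA, pvSel]
    by_cases h : PySem.Str.len s + PySem.Str.len p ≤ M
    · rw [if_pos h, if_pos h, ih]
      have hl : PySem.Str.len (s ++ (p ++ "\n")) = PySem.Str.len s + PySem.Str.len p + 1 := by
        simp
        ring
      rw [hl]
      simp [pvJoinNL, String.append_assoc]
    · rw [if_neg h, if_neg h]
      simp [pvJoinNL, String.append_empty]

lemma pvLenNonneg (p : String) : (0 : Int) ≤ PySem.Str.len p := by
  rw [PySem.Str.len_eq]; exact Int.natCast_nonneg _

lemma pvCumLB : ∀ (ps : List String) (t c : Int), c ∈ pvCumLoopB ps t → t + 1 ≤ c := by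
  intro ps
  induction ps with
  | nil => intro t c hc; simp [pvCumLoopB] at hc
  | cons p rest ih =>
    intro t c hc
    have hp := pvLenNonneg p
    simp only [pvCumLoopB, List.mem_cons] at hc
    rcases hc with rfl | hc
    · omega
    · have := ih _ _ hc; omega

lemma pvZipSel (M : Int) : ∀ (ps : List String) (t : Int),
    ((ps.zip (pvCumLoopB ps t)).filter (fun pc => decide (pc.2 ≤ M + 1))).map Prod.fst = pvSel M t ps := by
  intro ps
  induction ps with
  | nil => intro t; rfl
  | cons p rest ih =>
    intro t
    have hp := pvLenNonneg p
    simp only [pvCumLoopB, List.zip_cons_cons, List.filter_cons, pvSel]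
    by_cases h : t + PySem.Str.len p ≤ M
    · have h2 : t + (p.length : Int) ≤ M := by rw [PySem.Str.len_eq] at h; simpa using h
      have h3 : t + (p.length : Int) + 1 ≤ M + 1 := by omega
      simp [h2, h3, ih]
    · have h' : ¬ (t + PySem.Str.len p + 1 ≤ M + 1) := by omega
      have hnil : (rest.zip (pvCumLoopB rest (t + PySem.Str.len p + 1))).filter
          (fun pc => decide (pc.2 ≤ M + 1)) = [] := by
        rw [List.filter_eq_nil_iff]
        rintro ⟨a, c⟩ hmem
        have hc := (List.of_mem_zip hmem).2
        have hlb := pvCumLB rest _ _ hc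
        simp only [decide_eq_true_eq]
        omega
      rw [hnil, if_neg h]
      have h3 : ¬ (t + (p.length : Int) + 1 ≤ M + 1) := by
        rw [PySem.Str.len_eq] at h
        simp only [String.length_toList] at h
        omega
      simp [h3]

lemma pvSelMem (M : Int) : ∀ (ps : List String) (t : Int) (r : String), r ∈ pvSel M t ps → r ∈ ps := by
  intro ps
  induction ps with
  | nil => intro t r hr; simp [pvSel] at hr
  | cons p rest ih =>
    intro t r hr
    simp only [pvSel] at hr
    split_ifs at hr with h
    · rcases List.mem_cons.mp hr with rfl | hr
      · exact List.mem_cons_self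
      · exact List.mem_cons_of_mem _ (ih _ _ hr)
    · simp at hr

lemma pvMain (M : Int) (ps : List String)
    (H : ∀ r ∈ ps, List.dropWhile PySem.Chars.isspace r.toList = r.toList ∧
      List.dropWhile PySem.Chars.isspace r.toList.reverse = r.toList.reverse ∧ r ≠ "") :
    PySem.Str.strip (pvSummaryLoopA M ps "") =
      PySem.Str.join "\n" (((ps.zip (pvCumLoopB ps 0)).filter (fun pc => decide (pc.2 ≤ M + 1))).map Prod.fst) := by
  rw [pvZipSel, pvLoopEq]
  have h0 : PySem.Str.len "" = 0 := by decide
  rw [h0, String.empty_append]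
  exact pvStripJoin _ (fun r hr => H r (pvSelMem M _ _ _ hr))

-- ===== VERDICT (by name: the statement is the Claim_ definition above) =====
theorem generate_document_summary_spec : Claim_equal_generate_document_summary := by
  intro text max_length _
  unfold Spec_generate_document_summary generate_document_summary generate_document_summary_alt
  by_cases h : text = ""
  · simp [h]
  · rw [if_neg h, if_neg h]
    show PySem.Str.strip (pvSummaryLoopA max_length
        ((((PySem.Str.split? text "\n\n").getD []).map PySem.Str.strip).filter (fun p => p ≠ "")) "") =
      PySem.Str.join "\n"
        ((((((((PySem.Str.split? text "\n\n").getD []).map PySem.Str.strip).filter (fun p => p ≠ "")).zip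
            (pvCumLoopB ((((PySem.Str.split? text "\n\n").getD []).map PySem.Str.strip).filter (fun p => p ≠ "")) 0)).filter
          (fun pc => decide (pc.2 ≤ max_length + 1))).map Prod.fst))
    apply pvMain
    intro r hr
    rw [List.mem_filter] at hr
    obtain ⟨hr1, hr2⟩ := hr
    rw [List.mem_map] at hr1
    obtain ⟨q, -, rfl⟩ := hr1
    have hs := pvStripStripped q.toList
    refine ⟨?_, ?_, by simpa using hr2⟩
    · simpa [PySem.Str.toList_strip] using hs.1
    · simpa [PySem.Str.toList_strip] using hs.2
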